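-- pv_equiv track=rewrite | github.com/elevenisrising/SubGenie | src/translation/llm_translate.py | extract_srt_from_response
-- ===== SOURCE A (Python) =====
-- def extract_srt_from_response(response: str) -> str:
--     """Extract SRT content from LLM response, handling code blocks and cleaning up."""
--     # Look for content within code blocks
--     if "```" in response:
--         parts = response.split("```")
--         for i, part in enumerate(parts):
--             # Skip language specifiers like ```srt
--             if i % 2 == 1:  # Odd indices are within code blocks
--                 # Remove potential language specifier from the beginning
--                 lines = part.strip().split('\n')
--                 if lines and not lines[0].strip().isdigit():
--                     lines = lines[1:]  # Remove first line if it's a language specifier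
--                 return clean_srt_content('\n'.join(lines))
--
--     # If no code blocks found, return the entire response
--     return clean_srt_content(response.strip())
--
-- def clean_srt_content(content: str) -> str:
--     """Clean up SRT content to remove hallucinations and extra text."""
--     lines = content.split('\n')
--     cleaned_lines = []
--     in_srt_block = False
--
--     for line in lines:
--         line = line.strip()
--
--         # Skip empty lines at the beginning
--         if not line and not in_srt_block:
--             continue
--
--         # Check if line looks like subtitle index (just a number)
--         if line.isdigit():
--             in_srt_block = True
--             cleaned_lines.append(line)
--             continue
--
--         # Check if line looks like timestamp
--         if '-->' in line and ':' in line: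
--             in_srt_block = True
--             cleaned_lines.append(line)
--             continue
--
--         # If we're in SRT block and it's subtitle content
--         if in_srt_block:
--             # Keep the line if it looks like subtitle content
--             cleaned_lines.append(line)
--
--         # Add empty line after subtitle content
--         if line == '' and cleaned_lines and cleaned_lines[-1] != '':
--             cleaned_lines.append(line)
--
--     return '\n'.join(cleaned_lines)
-- ===== SOURCE B (Python) =====
-- def extract_srt_from_response(response: str) -> str:
--     """Extract SRT content from LLM response (find-trigger-then-slice decomposition)."""
--     if "```" in response:
--         # split always yields at least two parts here; A's loop always returns on the
--         # first code block (index 1), so take it directly.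
--         block = response.split("```")[1]
--         lines = block.strip().split('\n')
--         if lines and not lines[0].strip().isdigit():
--             lines = lines[1:]
--         content = '\n'.join(lines)
--     else:
--         content = response.strip()
--     stripped = [l.strip() for l in content.split('\n')]
--     for i, line in enumerate(stripped):
--         if line.isdigit() or ('-->' in line and ':' in line):
--             return '\n'.join(stripped[i:])
--     return ''
-- ===== Notes on version B (the rewrite author's own statement) =====
-- stated objective: simpler
-- what changed: clean_srt_content's stateful flag-accumulation pass (with its dead separator branch) is replaced by finding the first trigger line (digits, or an arrow timestamp with a colon) and joining the stripped suffix, and the enumerate-over-parts loop is replaced by indexing the first code-fence block directly.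
import Mathlib
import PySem

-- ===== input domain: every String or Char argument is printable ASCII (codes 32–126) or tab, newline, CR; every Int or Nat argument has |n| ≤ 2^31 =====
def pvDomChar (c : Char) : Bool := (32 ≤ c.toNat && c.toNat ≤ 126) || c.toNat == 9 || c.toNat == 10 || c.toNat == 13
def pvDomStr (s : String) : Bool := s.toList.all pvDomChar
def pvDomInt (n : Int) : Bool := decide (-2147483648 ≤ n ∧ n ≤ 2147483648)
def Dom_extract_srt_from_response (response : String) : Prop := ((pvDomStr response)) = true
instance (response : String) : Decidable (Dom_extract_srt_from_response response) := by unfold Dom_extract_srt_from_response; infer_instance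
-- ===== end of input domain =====

-- B replaces clean_srt_content's flag-accumulation pass by "find the first trigger line,
-- then join the stripped suffix", and takes the first code block directly as split("```")[1]
-- instead of looping over enumerate(parts) (objective: simpler).

-- shared primitive wrapper: Python s.split(sep) for a NON-EMPTY literal sep
-- (PySem.Str.split? is `some` exactly there, so `.getD []` is exact)
def pySplit (s sep : String) : List String := (PySem.Str.split? s sep).getD []

-- ===== PORT A =====
-- loop body of clean_srt_content (state = (cleaned_lines, in_srt_block))
def cleanStep (s : List String × Bool) (rawline : String) : List String × Bool :=
  let line := PySem.Str.strip rawline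
  if line == "" && !s.2 then s
  else if PySem.Str.strIsdigit line then (s.1 ++ [line], true)
  else if PySem.Str.isIn "-->" line && PySem.Str.isIn ":" line then (s.1 ++ [line], true)
  else
    let cleaned := if s.2 then s.1 ++ [line] else s.1
    let cleaned :=
      if line == "" && !cleaned.isEmpty && !(cleaned.getLast? == some "") then cleaned ++ [line]
      else cleaned
    (cleaned, s.2)

def clean_srt_content (content : String) : String :=
  PySem.Str.join "\n" ((pySplit content "\n").foldl cleanStep ([], false)).1

-- the `for i, part in enumerate(parts)` loop with its early return (none = fell through)
def partsLoopA : Nat → List String → Option String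
  | _, [] => none
  | i, part :: rest =>
    if i % 2 == 1 then
      let lines := pySplit (PySem.Str.strip part) "\n"
      let lines :=
        match lines with
        | [] => lines
        | l0 :: _ => if !PySem.Str.strIsdigit (PySem.Str.strip l0) then lines.tail else lines
      some (clean_srt_content (PySem.Str.join "\n" lines))
    else partsLoopA (i + 1) rest

def extract_srt_from_response (response : String) : String :=
  if PySem.Str.isIn "```" response then
    match partsLoopA 0 (pySplit response "```") with
    | some r => r
    | none => clean_srt_content (PySem.Str.strip response)
  else clean_srt_content (PySem.Str.strip response)

-- ===== PORT B =====
def srtTrigger (line : String) : Bool :=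
  PySem.Str.strIsdigit line || (PySem.Str.isIn "-->" line && PySem.Str.isIn ":" line)

-- B's `for i, line in enumerate(stripped): if trigger: return '\n'.join(stripped[i:])`
def srtScan : List String → String
  | [] => ""
  | line :: rest => if srtTrigger line then PySem.Str.join "\n" (line :: rest) else srtScan rest

def extract_srt_from_response_alt (response : String) : String :=
  let content :=
    if PySem.Str.isIn "```" response then
      -- parts[1]; the index is never out of range when "```" occurs in response
      let block := ((pySplit response "```")[1]?).getD ""
      let lines := pySplit (PySem.Str.strip block) "\n"
      let lines :=
        match lines with
        | [] => lines
        | l0 :: _ => if !PySem.Str.strIsdigit (PySem.Str.strip l0) then lines.tail else lines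
      PySem.Str.join "\n" lines
    else PySem.Str.strip response
  srtScan ((pySplit content "\n").map PySem.Str.strip)

-- ===== PRECONDITION & SPEC =====
def Spec_extract_srt_from_response (response : String) (out : String) : Prop := out = extract_srt_from_response_alt response
instance (response : String) (out : String) : Decidable (Spec_extract_srt_from_response response out) := by unfold Spec_extract_srt_from_response; infer_instance

-- ===== CLAIM (what is proved, stated in full; the proofs are below) =====
def Claim_equal_extract_srt_from_response : Prop := ∀ (response : String), Dom_extract_srt_from_response response → Spec_extract_srt_from_response response (extract_srt_from_response response)

-- ===== LEMMAS AND PROOFS =====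

theorem cleanStep_true (acc : List String) (l : String) :
    cleanStep (acc, true) l = (acc ++ [PySem.Str.strip l], true) := by
  by_cases h : PySem.Str.strip l = "" <;> simp [cleanStep, h]

theorem foldl_cleanStep_true (ls : List String) (acc : List String) :
    ls.foldl cleanStep (acc, true) = (acc ++ ls.map PySem.Str.strip, true) := by
  induction ls generalizing acc with
  | nil => simp
  | cons l ls ih => simp [cleanStep_true, ih]

theorem srtTrigger_empty : srtTrigger "" = false := by decide

theorem foldl_cleanStep_false (ls : List String) :
    PySem.Str.join "\n" ((ls.foldl cleanStep ([], false)).1)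
      = srtScan (ls.map PySem.Str.strip) := by
  induction ls with
  | nil => rfl
  | cons l ls ih =>
    simp only [List.foldl_cons, List.map_cons]
    by_cases h0 : PySem.Str.strip l = ""
    · have hstep : cleanStep ([], false) l = ([], false) := by simp [cleanStep, h0]
      rw [hstep, ih, h0]
      simp [srtScan, srtTrigger_empty]
    · cases hd : PySem.Chars.strIsdigit (PySem.Chars.strip l.toList) with
      | true =>
        have hstep : cleanStep ([], false) l = ([PySem.Str.strip l], true) := by
          simp [cleanStep, hd, h0]
        rw [hstep, foldl_cleanStep_true]
        simp [srtScan, srtTrigger, hd]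
      | false =>
        cases hIn : (PySem.Chars.isIn ['-','-','>'] (PySem.Chars.strip l.toList) &&
            PySem.Chars.isIn [':'] (PySem.Chars.strip l.toList)) with
        | true =>
          have hstep : cleanStep ([], false) l = ([PySem.Str.strip l], true) := by
            simp [cleanStep, hd]
            simp_all
          rw [hstep, foldl_cleanStep_true]
          simp [srtScan, srtTrigger, hd]
          simp_all
        | false =>
          have hstep : cleanStep ([], false) l = ([], false) := by
            simp [cleanStep, hd, h0]
            simp_all
          rw [hstep, ih]
          simp [srtScan, srtTrigger, hd]
          simp_all

theorem clean_eq (c : String) :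
    clean_srt_content c = srtScan ((pySplit c "\n").map PySem.Str.strip) := by
  simpa [clean_srt_content] using foldl_cleanStep_false (pySplit c "\n")

-- splitOn produces at least acc.length + 1 pieces
theorem splitOn_go_len (sep : List Char) (fuel : Nat) :
    ∀ (l cur : List Char) (acc : List (List Char)),
      acc.length + 1 ≤ (PySem.Chars.splitOn.go sep fuel l cur acc).length := by
  induction fuel with
  | zero => intro l cur acc; simp [PySem.Chars.splitOn.go]
  | succ fuel ih =>
    intro l cur acc
    cases l with
    | nil => simp [PySem.Chars.splitOn.go]
    | cons c rest =>
      simp only [PySem.Chars.splitOn.go]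
      split_ifs with h
      · have h1 := ih (List.drop sep.length (c :: rest)) [] (cur.reverse :: acc)
        simp only [List.length_cons] at h1
        omega
      · exact ih rest (c :: cur) acc

theorem splitOn_go_len2 (sep : List Char) (hsep : sep ≠ []) (fuel : Nat) :
    ∀ (l cur : List Char) (acc : List (List Char)), sep <:+: l → l.length < fuel →
      acc.length + 2 ≤ (PySem.Chars.splitOn.go sep fuel l cur acc).length := by
  induction fuel with
  | zero => intro l cur acc _ h; omega
  | succ fuel ih =>
    intro l cur acc hinf hlen
    cases l with
    | nil => exact absurd (List.eq_nil_of_infix_nil hinf) hsep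
    | cons c rest =>
      simp only [PySem.Chars.splitOn.go]
      split_ifs with h
      · have h1 := splitOn_go_len sep fuel (List.drop sep.length (c :: rest)) []
          (cur.reverse :: acc)
        simp only [List.length_cons] at h1
        omega
      · rcases List.infix_cons_iff.mp hinf with hpre | hinf'
        · exact absurd (List.isPrefixOf_iff_prefix.mpr hpre) (by simp [h])
        · exact ih rest (c :: cur) acc hinf' (by simp at hlen ⊢; omega)

theorem splitOn_two_le (s sub : List Char) (hsub : sub ≠ [])
    (h : PySem.Chars.isIn sub s = true) : 2 ≤ (PySem.Chars.splitOn s sub).length := by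
  have := splitOn_go_len2 sub hsub (s.length + 1) s [] []
    ((PySem.Chars.isIn_iff_infix sub s).mp h) (by omega)
  simpa using this

theorem pySplit_fence_len (response : String) (h : PySem.Str.isIn "```" response = true) :
    2 ≤ (pySplit response "```").length := by
  have h' : PySem.Chars.isIn "```".toList response.toList = true := by
    simpa [PySem.Str.isIn] using h
  have := splitOn_two_le response.toList "```".toList (by decide) h'
  simpa [pySplit, PySem.Str.split?, PySem.Chars.split?] using this

-- ===== VERDICT (by name: the statement is the Claim_ definition above) =====
theorem extract_srt_from_response_spec : Claim_equal_extract_srt_from_response := by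
  intro response _
  unfold Spec_extract_srt_from_response extract_srt_from_response extract_srt_from_response_alt
  by_cases h : PySem.Str.isIn "```" response = true
  · rw [if_pos h, if_pos h]
    have hlen := pySplit_fence_len response h
    obtain ⟨p0, p1, rest, hparts⟩ :
        ∃ p0 p1 rest, pySplit response "```" = p0 :: p1 :: rest := by
      rcases hp : pySplit response "```" with _ | ⟨a, _ | ⟨b, t⟩⟩ <;>
        simp [hp] at hlen ⊢
    rw [hparts]
    simp [partsLoopA, clean_eq]
  · rw [if_neg h, if_neg h]
    exact clean_eq _
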